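-- pv_equiv track=rewrite | github.com/Suge8/rodbot | rodbot/agent/memory.py | _set_field
-- ===== SOURCE A (Python) =====
-- def _set_field(content: str, field: str, value: str) -> str:
--     lines = content.split("\n")
--     for i, line in enumerate(lines):
--         if line.startswith(f"[{field}]"):
--             lines[i] = f"[{field}] {value}"
--             return "\n".join(lines)
--     lines.append(f"[{field}] {value}")
--     return "\n".join(lines)
-- ===== SOURCE B (Python) =====
-- def _set_field(content: str, field: str, value: str) -> str:
--     prefix = f"[{field}]"
--     new_line = f"{prefix} {value}"
--     if content.startswith(prefix):
--         start = 0
--     else: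
--         pos = content.find("\n" + prefix)
--         if pos == -1:
--             return content + "\n" + new_line
--         start = pos + 1
--     end = content.find("\n", start)
--     if end == -1:
--         return content[:start] + new_line
--     return content[:start] + new_line + content[end:]
-- ===== Notes on version B (the rewrite author's own statement) =====
-- stated objective: alternative
-- what changed: B never builds the line list: it locates the field line by a single substring search (startswith / find of '\n[field]'), then splices the replacement between the surrounding slices, instead of A's split-into-lines, indexed scan and re-join.
-- outside the precondition, e.g. on _set_field('[x\ny] old', 'x\ny', 'new'): A returns '[x\ny] old\n[x\ny] new', B returns '[x\ny] new\ny] old'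
import Mathlib
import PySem

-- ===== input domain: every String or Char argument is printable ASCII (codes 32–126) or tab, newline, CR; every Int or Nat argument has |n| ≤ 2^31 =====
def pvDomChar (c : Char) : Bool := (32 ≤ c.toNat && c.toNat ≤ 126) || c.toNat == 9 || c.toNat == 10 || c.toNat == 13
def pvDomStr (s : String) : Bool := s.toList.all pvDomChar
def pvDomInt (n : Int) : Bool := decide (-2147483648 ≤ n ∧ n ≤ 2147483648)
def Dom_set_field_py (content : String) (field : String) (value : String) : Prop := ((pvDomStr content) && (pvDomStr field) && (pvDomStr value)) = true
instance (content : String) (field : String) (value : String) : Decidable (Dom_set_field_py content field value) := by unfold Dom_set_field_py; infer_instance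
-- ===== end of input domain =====

-- B replaces A's split-into-lines / indexed scan / re-join by a single substring
-- search ("\n" + prefix) and a slice splice on the raw string (objective: alternative).

-- ===== PORT A =====
-- A's for-loop over enumerate(lines): replace the first line starting with pref
-- by newl and keep the rest; if no line matches, append newl at the end.
def pvALines (pref newl : List Char) : List (List Char) → List (List Char)
  | [] => [newl]
  | l :: rest =>
      if PySem.Chars.startswith l pref then newl :: rest
      else l :: pvALines pref newl rest

def set_field_py (content : String) (field : String) (value : String) : String :=
  let pref := '[' :: field.toList ++ [']']          -- f"[{field}]"
  let newl := pref ++ ' ' :: value.toList           -- f"[{field}] {value}"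
  String.ofList
    (PySem.Chars.join ['\n'] (pvALines pref newl (PySem.Chars.splitOn content.toList ['\n'])))

-- ===== PORT B =====
-- content[:start] + new_line (+ content[end:] if a "\n" occurs at/after start)
def pvBSplice (newl cs : List Char) (start : Int) : List Char :=
  let e := PySem.Chars.findFrom cs ['\n'] start
  if e = -1 then PySem.Chars.slice cs none (some start) ++ newl
  else PySem.Chars.slice cs none (some start) ++ newl ++ PySem.Chars.slice cs (some e) none

def pvBChars (pref newl cs : List Char) : List Char :=
  if PySem.Chars.startswith cs pref then pvBSplice newl cs 0
  else
    let pos := PySem.Chars.find cs ('\n' :: pref)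
    if pos = -1 then cs ++ '\n' :: newl
    else pvBSplice newl cs (pos + 1)

def set_field_py_alt (content : String) (field : String) (value : String) : String :=
  let pref := '[' :: field.toList ++ [']']          -- f"[{field}]"
  String.ofList (pvBChars pref (pref ++ ' ' :: value.toList) content.toList)

-- ===== PRECONDITION & SPEC =====
-- Pre_ excludes field strings containing a newline: there the bracket tag "[field]"
-- spans lines, a format no caller can mean; A (whose per-line scan can never match
-- such a tag) always appends, while B's raw-string search may match across the line
-- break — both behaviours are accidental readings of an unspecifiable corner.
def Pre_set_field_py (content : String) (field : String) (value : String) : Prop :=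
  '\n' ∉ field.toList
instance (content : String) (field : String) (value : String) : Decidable (Pre_set_field_py content field value) := by unfold Pre_set_field_py; infer_instance

def pvWitness_set_field_py : String × String × String := ("[a] 1\n[b] 2", "b", "3")

def Spec_set_field_py (content : String) (field : String) (value : String) (out : String) : Prop := out = set_field_py_alt content field value
instance (content : String) (field : String) (value : String) (out : String) : Decidable (Spec_set_field_py content field value out) := by unfold Spec_set_field_py; infer_instance

-- ===== CLAIM (what is proved, stated in full; the proofs are below) =====
def Claim_equal_set_field_py : Prop := ∀ (content : String) (field : String) (value : String), Dom_set_field_py content field value → Pre_set_field_py content field value → Spec_set_field_py content field value (set_field_py content field value)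

-- ===== LEMMAS AND PROOFS =====

-- the list-of-lines that content.split("\n") produces, in directly recursive form
def pvSplit (c : Char) : List Char → List (List Char)
  | [] => [[]]
  | x :: r => if x = c then [] :: pvSplit c r else (pvSplit c r).modifyHead (x :: ·)

lemma pvSplit_ne_nil (c : Char) (s : List Char) : pvSplit c s ≠ [] := by
  induction s with
  | nil => simp [pvSplit]
  | cons x r ih =>
      simp only [pvSplit]
      split
      · simp
      · cases h : pvSplit c r with
        | nil => exact absurd h ih
        | cons y t => simp

lemma pv_go (c : Char) (fuel : Nat) :
    ∀ (l cur : List Char) (acc : List (List Char)), l.length ≤ fuel →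
      PySem.Chars.splitOn.go [c] fuel l cur acc
        = acc.reverse ++ (pvSplit c l).modifyHead (cur.reverse ++ ·) := by
  induction fuel with
  | zero =>
      intro l cur acc h
      have : l = [] := by cases l <;> simp_all
      subst this
      simp [PySem.Chars.splitOn.go, pvSplit]
  | succ m ih =>
      intro l cur acc h
      cases l with
      | nil => simp [PySem.Chars.splitOn.go, pvSplit]
      | cons x rest =>
          simp only [PySem.Chars.splitOn.go]
          by_cases hx : x = c
          · subst hx
            have hpre : [x].isPrefixOf (x :: rest) = true := by simp [List.isPrefixOf]
            rw [if_pos hpre]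
            have hd : List.drop ([x].length) (x :: rest) = rest := by simp
            rw [hd, ih rest [] ((cur.reverse) :: acc) (by simpa using Nat.le_of_succ_le_succ h)]
            simp only [pvSplit]
            cases hsp : pvSplit x rest with
            | nil => simp
            | cons y t => simp
          · have hpre : [c].isPrefixOf (x :: rest) = false := by
              simp [List.isPrefixOf]
              intro hc; exact absurd hc.symm hx
            rw [if_neg (by simp [hpre])]
            rw [ih rest (x :: cur) acc (by simpa using Nat.le_of_succ_le_succ h)]
            simp only [pvSplit, if_neg hx]
            cases hsp : pvSplit c rest with
            | nil => exact absurd hsp (pvSplit_ne_nil c rest)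
            | cons y t => simp

lemma pv_splitOn (c : Char) (s : List Char) :
    PySem.Chars.splitOn s [c] = pvSplit c s := by
  have := pv_go c (s.length + 1) s [] [] (by omega)
  simp only [PySem.Chars.splitOn, List.reverse_nil, List.nil_append] at this ⊢
  rw [this]
  cases hsp : pvSplit c s with
  | nil => rfl
  | cons y t => simp

lemma pvSplit_of_not_mem {c : Char} {s : List Char} (h : c ∉ s) : pvSplit c s = [s] := by
  induction s with
  | nil => simp [pvSplit]
  | cons x r ih =>
      simp only [List.mem_cons, not_or] at h
      have hx : ¬ x = c := fun hx => h.1 hx.symm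
      simp [pvSplit, hx, ih h.2]

lemma pvSplit_append {c : Char} {a : List Char} (b : List Char) (h : c ∉ a) :
    pvSplit c (a ++ c :: b) = a :: pvSplit c b := by
  induction a with
  | nil => simp [pvSplit]
  | cons x r ih =>
      simp only [List.mem_cons, not_or] at h
      simp only [List.cons_append, pvSplit,
        if_neg (show ¬ x = c from fun hx => h.1 hx.symm), ih h.2]
      simp

lemma pv_join_cons (c : Char) (x : List Char) {L : List (List Char)} (h : L ≠ []) :
    PySem.Chars.join [c] (x :: L) = x ++ c :: PySem.Chars.join [c] L := by
  cases L with
  | nil => exact absurd rfl h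
  | cons y t => rw [PySem.Chars.join_cons_cons]; simp

lemma pv_join_split (c : Char) (s : List Char) :
    PySem.Chars.join [c] (pvSplit c s) = s := by
  induction s with
  | nil => simp [pvSplit, PySem.Chars.join_singleton]
  | cons x r ih =>
      simp only [pvSplit]
      by_cases hx : x = c
      · subst hx
        rw [if_pos rfl, pv_join_cons _ [] (pvSplit_ne_nil _ r), ih]
        simp
      · rw [if_neg hx]
        cases hsp : pvSplit c r with
        | nil => exact absurd hsp (pvSplit_ne_nil c r)
        | cons y t =>
            rw [hsp] at ih
            cases t with
            | nil =>
                rw [PySem.Chars.join_singleton] at ih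
                simp [PySem.Chars.join_singleton, ih]
            | cons z u =>
                rw [pv_join_cons c y (by simp)] at ih
                simp only [List.modifyHead]
                rw [pv_join_cons c (x :: y) (by simp)]
                simp [ih]

lemma pvALines_ne_nil (pref newl : List Char) (L : List (List Char)) :
    pvALines pref newl L ≠ [] := by
  cases L with
  | nil => simp [pvALines]
  | cons l rest =>
      simp only [pvALines]
      split <;> simp

-- find s sub = v when sub occurs at v and at no earlier position
lemma pv_find_eq {s sub : List Char} {v : Nat}
    (h1 : sub <+: s.drop v) (h2 : ∀ i < v, ¬ sub <+: s.drop i) :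
    PySem.Chars.find s sub = (v : Int) := by
  have hnn : 0 ≤ PySem.Chars.find s sub := by
    rw [PySem.Chars.find_nonneg_iff, ← PySem.Chars.isIn_iff_infix,
      ← PySem.Chars.exists_prefix_drop_iff_isIn]
    exact ⟨v, h1⟩
  obtain ⟨hpre, hmin⟩ := PySem.Chars.find_spec hnn
  have hv : (PySem.Chars.find s sub).toNat = v := by
    rcases Nat.lt_trichotomy (PySem.Chars.find s sub).toNat v with h | h | h
    · exact absurd hpre (h2 _ h)
    · exact h
    · exact absurd h1 (hmin v h)
  omega

-- a prefix beginning with c cannot start inside a (c ∉ a)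
lemma pv_no_early {c : Char} {a b sub : List Char} (ha : c ∉ a) {i : Nat} (hi : i < a.length) :
    ¬ (c :: sub) <+: (a ++ c :: b).drop i := by
  intro h
  obtain ⟨t, ht⟩ := h
  have h0 : ((a ++ c :: b).drop i)[0]? = some c := by rw [← ht]; simp
  rw [List.getElem?_drop, Nat.add_zero, List.getElem?_append_left hi] at h0
  exact ha (List.mem_of_getElem? h0)

lemma pv_drop_mid (a b : List Char) (c : Char) (j : Nat) :
    (a ++ c :: b).drop (a.length + 1 + j) = b.drop j := by
  induction a with
  | nil => simp [Nat.add_comm 1 j]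
  | cons x r ih =>
      simp only [List.cons_append, List.length_cons]
      have h : r.length + 1 + 1 + j = (r.length + 1 + j) + 1 := by omega
      rw [h, List.drop_succ_cons]
      exact ih

lemma pv_take_mid (a b : List Char) (c : Char) (j : Nat) :
    (a ++ c :: b).take (a.length + 1 + j) = a ++ c :: b.take j := by
  induction a with
  | nil => simp [Nat.add_comm 1 j]
  | cons x r ih =>
      simp only [List.cons_append, List.length_cons]
      have h : r.length + 1 + 1 + j = (r.length + 1 + j) + 1 := by omega
      rw [h, List.take_succ_cons, ih]

-- for pref not containing '\n': pref <+: a ++ '\n' :: b ↔ pref <+: a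
lemma pv_prefix_line {pref a : List Char} (b : List Char) (hnp : '\n' ∉ pref) :
    pref <+: a ++ '\n' :: b ↔ pref <+: a := by
  constructor
  · intro h
    rcases List.prefix_or_prefix_of_prefix h (List.prefix_append a ('\n' :: b)) with h' | h'
    · exact h'
    · obtain ⟨t, ht⟩ := h'
      cases t with
      | nil => rw [List.append_nil] at ht; rw [ht]
      | cons z u =>
          exfalso
          obtain ⟨w, hw⟩ := h
          rw [← ht, List.append_assoc] at hw
          have hz : z :: (u ++ w) = '\n' :: b := by
            simp only [List.cons_append] at hw
            exact List.append_cancel_left hw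
          have : z = '\n' := (List.cons_eq_cons.mp hz).1
          subst this
          exact hnp (by rw [← ht]; exact List.mem_append_right a (by simp))
  · intro h
    exact h.trans (List.prefix_append a ('\n' :: b))

-- the splice at a start position strictly inside line structure shifts over a full first line
lemma pv_bsplice_shift (newl a b : List Char) (j : Nat) (hj : j ≤ b.length) :
    pvBSplice newl (a ++ '\n' :: b) ((a.length : Int) + 1 + (j : Int))
      = a ++ '\n' :: pvBSplice newl b (j : Int) := by
  have hcast : (a.length : Int) + 1 + (j : Int) = ((a.length + 1 + j : Nat) : Int) := by push_cast; ring
  have hlen : a.length + 1 + j ≤ (a ++ '\n' :: b).length := by simp; omega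
  simp only [pvBSplice, hcast]
  rw [PySem.Chars.findFrom_natCast _ _ _ hlen, PySem.Chars.findFrom_natCast _ _ j hj]
  rw [pv_drop_mid]
  have hnn' := PySem.Chars.neg_one_le_find (b.drop j) ['\n']
  set f := PySem.Chars.find (b.drop j) ['\n'] with hfdef
  by_cases hf : f = -1
  · simp only [if_pos hf, if_true]
    simp only [PySem.Chars.slice_eq_listSlice, PySem.List.slice_to_natCast]
    rw [pv_take_mid]
    simp
  · simp only [if_neg hf]
    have hnn : 0 ≤ f := by omega
    have hne1 : ¬ ((a.length + 1 + j : Nat) : Int) + f = -1 := by omega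
    have hne2 : ¬ (j : Int) + f = -1 := by omega
    rw [if_neg hne1, if_neg hne2]
    simp only [PySem.Chars.slice_eq_listSlice]
    rw [PySem.List.slice_to_natCast, PySem.List.slice_to_natCast, pv_take_mid]
    have hs1 : PySem.List.slice (a ++ '\n' :: b) (some (((a.length + 1 + j : Nat) : Int) + f)) none
        = (a ++ '\n' :: b).drop ((((a.length + 1 + j : Nat) : Int) + f).toNat) :=
      PySem.List.slice_from _ (by omega)
    have hs2 : PySem.List.slice b (some ((j : Int) + f)) none = b.drop (((j : Int) + f).toNat) :=
      PySem.List.slice_from _ (by omega)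
    rw [hs1, hs2]
    have h1 : (((a.length + 1 + j : Nat) : Int) + f).toNat = a.length + 1 + (j + f.toNat) := by omega
    have h2 : ((j : Int) + f).toNat = j + f.toNat := by omega
    rw [h1, h2, pv_drop_mid]
    simp

-- occurrence of a prefix at/after the first line lands in b
lemma pv_drop_cases {a b : List Char} {sub : List Char} (ha : '\n' ∉ a) (j : Nat)
    (h : ('\n' :: sub) <+: (a ++ '\n' :: b).drop j) :
    (j = a.length ∧ sub <+: b) ∨ (a.length < j ∧ ('\n' :: sub) <+: b.drop (j - a.length - 1)) := by
  rcases Nat.lt_trichotomy j a.length with hj | hj | hj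
  · exact absurd h (pv_no_early ha hj)
  · left
    refine ⟨hj, ?_⟩
    subst hj
    rw [List.drop_append_of_le_length (le_refl _)] at h
    simp [List.cons_prefix_cons] at h
    exact h
  · right
    refine ⟨hj, ?_⟩
    have : j = a.length + 1 + (j - a.length - 1) := by omega
    rw [this, pv_drop_mid] at h
    exact h

-- first-occurrence decomposition of a string containing '\n'
lemma pv_first_split {cs : List Char} (h : '\n' ∈ cs) :
    ∃ a b, cs = a ++ '\n' :: b ∧ '\n' ∉ a := by
  induction cs with
  | nil => simp at h
  | cons x r ih =>
      by_cases hx : x = '\n'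
      · exact ⟨[], r, by simp [hx], by simp⟩
      · have hr : '\n' ∈ r := by
          rcases List.mem_cons.mp h with h' | h'
          · exact absurd h'.symm hx
          · exact h'
        obtain ⟨a, b, rfl, hna⟩ := ih hr
        exact ⟨x :: a, b, rfl, by simp [hna]; exact fun he => hx he.symm⟩

lemma pv_infix_of_prefix_drop {sub b : List Char} {k : Nat} (h : sub <+: b.drop k) :
    sub <:+: b := by
  rw [← PySem.Chars.isIn_iff_infix, ← PySem.Chars.exists_prefix_drop_iff_isIn]
  exact ⟨k, h⟩

-- the no-'\n' case: one line on both sides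
lemma pv_main_noNL (pref newl cs : List Char) (hmem : '\n' ∉ cs) :
    PySem.Chars.join ['\n'] (pvALines pref newl (pvSplit '\n' cs)) = pvBChars pref newl cs := by
  rw [pvSplit_of_not_mem hmem]
  simp only [pvBChars]
  by_cases hsw : PySem.Chars.startswith cs pref = true
  · rw [if_pos hsw]
    simp only [pvALines, if_pos hsw, PySem.Chars.join_singleton]
    simp only [pvBSplice]
    have hfind : PySem.Chars.find cs ['\n'] = -1 := by
      rw [PySem.Chars.find_eq_neg_one_iff]
      intro hinf
      exact hmem (hinf.subset (by simp))
    rw [PySem.Chars.findFrom_zero, hfind, if_pos rfl]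
    have h0 : PySem.List.slice cs none (some 0) = [] := by
      rw [PySem.List.slice_to cs (le_refl 0)]
      simp
    simp [h0]
  · rw [if_neg hsw]
    simp only [pvALines, if_neg hsw, pvALines]
    rw [pv_join_cons _ cs (by simp), PySem.Chars.join_singleton]
    have hfind : PySem.Chars.find cs ('\n' :: pref) = -1 := by
      rw [PySem.Chars.find_eq_neg_one_iff]
      intro hinf
      exact hmem (hinf.subset (by simp))
    rw [hfind, if_pos rfl]

-- B over a non-matching complete first line recurses into the tail
lemma pv_bchars_step (pref newl a b : List Char) (hnp : '\n' ∉ pref)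
    (hna : '\n' ∉ a) (hsw : ¬ pref <+: a) :
    pvBChars pref newl (a ++ '\n' :: b) = a ++ '\n' :: pvBChars pref newl b := by
  have hswcs : ¬ PySem.Chars.startswith (a ++ '\n' :: b) pref = true := by
    rw [PySem.Chars.startswith_iff, pv_prefix_line b hnp]
    exact hsw
  simp only [pvBChars]
  rw [if_neg hswcs]
  by_cases hswb : PySem.Chars.startswith b pref = true
  · -- matching line starts right after this one
    have hpb : pref <+: b := (PySem.Chars.startswith_iff _ _).mp hswb
    have hfind : PySem.Chars.find (a ++ '\n' :: b) ('\n' :: pref) = (a.length : Int) := by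
      apply pv_find_eq
      · rw [List.drop_left]
        exact List.cons_prefix_cons.mpr ⟨rfl, hpb⟩
      · intro i hi
        exact pv_no_early hna hi
    rw [hfind, if_neg (by omega), if_pos hswb]
    have := pv_bsplice_shift newl a b 0 (by omega)
    simpa using this
  · rw [if_neg hswb]
    by_cases hq : PySem.Chars.find b ('\n' :: pref) = -1
    · have hfind : PySem.Chars.find (a ++ '\n' :: b) ('\n' :: pref) = -1 := by
        rw [PySem.Chars.find_eq_neg_one_iff]
        intro hinf
        obtain ⟨j, hj⟩ := (PySem.Chars.exists_prefix_drop_iff_isIn ('\n' :: pref) _).mpr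
          ((PySem.Chars.isIn_iff_infix _ _).mpr hinf)
        rcases pv_drop_cases hna j hj with ⟨_, hp⟩ | ⟨_, hp⟩
        · exact hswb ((PySem.Chars.startswith_iff _ _).mpr hp)
        · exact (PySem.Chars.find_eq_neg_one_iff _ _).mp hq (pv_infix_of_prefix_drop hp)
      rw [hfind, if_pos rfl, if_pos hq]
      simp
    · have hqn : 0 ≤ PySem.Chars.find b ('\n' :: pref) := by
        have := PySem.Chars.neg_one_le_find b ('\n' :: pref)
        omega
      obtain ⟨hqpre, hqmin⟩ := PySem.Chars.find_spec hqn
      set q := (PySem.Chars.find b ('\n' :: pref)).toNat with hqdef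
      have hfq : PySem.Chars.find b ('\n' :: pref) = (q : Int) := by omega
      have hfind : PySem.Chars.find (a ++ '\n' :: b) ('\n' :: pref) = ((a.length + 1 + q : Nat) : Int) := by
        apply pv_find_eq
        · rw [pv_drop_mid]
          exact hqpre
        · intro i hi h
          rcases pv_drop_cases hna i h with ⟨_, hp⟩ | ⟨hgt, hp⟩
          · exact hswb ((PySem.Chars.startswith_iff _ _).mpr hp)
          · exact hqmin (i - a.length - 1) (by omega) hp
      rw [hfind, if_neg (by omega), if_neg hq]
      have hjle : q + 1 ≤ b.length := by
        have hne : b.drop q ≠ [] := by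
          intro h0
          rw [h0] at hqpre
          have := List.prefix_nil.mp hqpre
          simp at this
        rw [Ne, List.drop_eq_nil_iff] at hne
        omega
      have hshift := pv_bsplice_shift newl a b (q + 1) hjle
      have hc1 : ((a.length + 1 + q : Nat) : Int) + 1 = (a.length : Int) + 1 + ((q + 1 : Nat) : Int) := by
        push_cast; ring
      have hc2 : PySem.Chars.find b ('\n' :: pref) + 1 = ((q + 1 : Nat) : Int) := by
        push_cast; omega
      rw [hc1, hc2, hshift]

-- MAIN: A's join∘scan∘split equals B's find/splice, for a nonempty pref without '\n'
lemma pv_main (pref newl : List Char) (hnp : '\n' ∉ pref) :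
    ∀ (n : Nat) (cs : List Char), cs.length ≤ n →
      PySem.Chars.join ['\n'] (pvALines pref newl (pvSplit '\n' cs)) = pvBChars pref newl cs := by
  intro n
  induction n with
  | zero =>
      intro cs hlen
      have : cs = [] := by cases cs <;> simp_all
      subst this
      exact pv_main_noNL pref newl [] (by simp)
  | succ m ih =>
      intro cs hlen
      by_cases hmem : '\n' ∈ cs
      · obtain ⟨a, b, rfl, hna⟩ := pv_first_split hmem
        have hlb : b.length ≤ m := by
          simp only [List.length_append, List.length_cons] at hlen
          omega
        rw [pvSplit_append b hna]
        by_cases hsw : PySem.Chars.startswith a pref = true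
        · -- first line matches: A rewrites it, B splices at position 0
          simp only [pvALines, if_pos hsw]
          rw [pv_join_cons _ newl (pvSplit_ne_nil _ b), pv_join_split]
          have hpa : pref <+: a := (PySem.Chars.startswith_iff _ _).mp hsw
          have hswcs : PySem.Chars.startswith (a ++ '\n' :: b) pref = true := by
            rw [PySem.Chars.startswith_iff]
            exact hpa.trans (List.prefix_append a _)
          simp only [pvBChars]
          rw [if_pos hswcs]
          simp only [pvBSplice]
          have hfind : PySem.Chars.find (a ++ '\n' :: b) ['\n'] = (a.length : Int) := by
            apply pv_find_eq
            · rw [List.drop_left]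
              exact ⟨b, rfl⟩
            · intro i hi
              exact pv_no_early hna hi
          rw [PySem.Chars.findFrom_zero, hfind, if_neg (by omega)]
          have h0 : PySem.Chars.slice (a ++ '\n' :: b) none (some 0) = [] := by
            rw [PySem.Chars.slice_eq_listSlice, PySem.List.slice_to _ (le_refl 0)]
            simp
          have h1 : PySem.Chars.slice (a ++ '\n' :: b) (some (a.length : Int)) none = '\n' :: b := by
            rw [PySem.Chars.slice_eq_listSlice, PySem.List.slice_from _ (by omega)]
            simp
          rw [h0, h1]
          simp
        · -- first line does not match: both sides keep it and recurse
          simp only [pvALines, if_neg hsw]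
          rw [pv_join_cons _ a (pvALines_ne_nil pref newl _), ih b hlb]
          rw [pv_bchars_step pref newl a b hnp hna
            (fun hp => hsw ((PySem.Chars.startswith_iff _ _).mpr hp))]
      · exact pv_main_noNL pref newl cs hmem



-- ===== VERDICT (by name: the statement is the Claim_ definition above) =====
theorem set_field_py_spec : Claim_equal_set_field_py := by
  intro content field value hdom hpre
  unfold Spec_set_field_py set_field_py set_field_py_alt
  simp only
  congr 1
  rw [pv_splitOn]
  have hnp : '\n' ∉ ('[' :: field.toList ++ [']']) := by
    intro hmem
    rcases List.mem_cons.mp hmem with h | h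
    · exact absurd h (by decide)
    · rcases List.mem_append.mp h with h | h
      · exact hpre h
      · exact absurd (List.mem_singleton.mp h) (by decide)
  exact pv_main _ _ hnp content.toList.length content.toList (le_refl _)
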